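-- pv_equiv track=rewrite | github.com/skytwosea/self_directed_studies | structure-interp-computer-programs/coursework/done/week05/cats/cats.py | sphinx_swap
-- ===== SOURCE A (Python) =====
-- def sphinx_swap(start, goal, limit):
--     """A diff function for autocorrect that determines how many letters
--     in START need to be substituted to create GOAL, then adds the difference in
--     their lengths.
--     """
--     # BEGIN PROBLEM 6
--     if limit < 0:
--         return 1
--     elif len(start) == 0 or len(goal) == 0:
--         return max(len(start), len(goal))
--     elif start[0] == goal[0]:
--         return sphinx_swap(start[1:], goal[1:], limit)
--     else:
--         return 1 + sphinx_swap(start[1:], goal[1:], limit-1)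
-- ===== SOURCE B (Python) =====
-- def sphinx_swap(start, goal, limit):
--     """Single index-based pass: count mismatches until the limit is
--     exceeded, then add the length difference."""
--     if limit < 0:
--         return 1
--     diffs = 0
--     for a, b in zip(start, goal):
--         if a != b:
--             diffs += 1
--             if diffs > limit:
--                 return diffs + 1
--     return diffs + abs(len(start) - len(goal))
-- ===== Notes on version B (the rewrite author's own statement) =====
-- stated objective: faster
-- what changed: Replaced the slicing recursion (each step copies both string tails) by one index-based pass over the zipped characters that counts mismatches with an early exit when the limit is exceeded.
import Mathlib
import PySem

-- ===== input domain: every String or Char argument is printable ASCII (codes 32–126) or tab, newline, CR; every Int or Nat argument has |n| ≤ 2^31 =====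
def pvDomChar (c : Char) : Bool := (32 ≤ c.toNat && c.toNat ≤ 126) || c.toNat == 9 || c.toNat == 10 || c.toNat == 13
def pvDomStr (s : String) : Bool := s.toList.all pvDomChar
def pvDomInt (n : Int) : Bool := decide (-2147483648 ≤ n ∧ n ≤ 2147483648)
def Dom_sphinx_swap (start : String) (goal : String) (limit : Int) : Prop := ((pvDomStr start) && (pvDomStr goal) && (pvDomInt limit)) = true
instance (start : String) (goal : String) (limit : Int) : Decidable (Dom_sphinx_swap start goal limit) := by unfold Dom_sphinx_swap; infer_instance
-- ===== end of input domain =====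

-- B replaces A's slicing recursion by one index-based pass counting mismatches with an early exit (faster; return value only, no side effects).

-- ===== PORT A =====
-- literal transliteration of A's recursion on the character lists
-- (start[0] -> headI, start[1:] -> tail; heads exist in the branch that reads them)
def sphinxSwapRecA (s g : List Char) (limit : Int) : Int :=
  if limit < 0 then 1
  else if s = [] ∨ g = [] then (max s.length g.length : Nat)
  else if s.headI = g.headI then sphinxSwapRecA s.tail g.tail limit
  else 1 + sphinxSwapRecA s.tail g.tail (limit - 1)
  termination_by s.length
  decreasing_by all_goals (cases s <;> simp_all)

def sphinx_swap (start : String) (goal : String) (limit : Int) : Int :=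
  sphinxSwapRecA start.toList goal.toList limit

-- ===== PORT B =====
-- the for-loop of Source B over zip(start, goal): diffs accumulator, early return when diffs > limit;
-- the fall-through return diffs + abs(len difference) is the [] case (lenDiff is passed in unchanged)
def sphinxSwapLoopB : List (Char × Char) → Int → Int → Int → Int
  | [], diffs, _, lenDiff => diffs + lenDiff
  | (a, b) :: rest, diffs, limit, lenDiff =>
    if a ≠ b then
      if diffs + 1 > limit then diffs + 1 + 1
      else sphinxSwapLoopB rest (diffs + 1) limit lenDiff
    else sphinxSwapLoopB rest diffs limit lenDiff

def sphinx_swap_alt (start : String) (goal : String) (limit : Int) : Int :=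
  if limit < 0 then 1
  else sphinxSwapLoopB (start.toList.zip goal.toList) 0 limit
        |(start.toList.length : Int) - (goal.toList.length : Int)|

-- ===== PRECONDITION & SPEC =====
def Spec_sphinx_swap (start : String) (goal : String) (limit : Int) (out : Int) : Prop := out = sphinx_swap_alt start goal limit
instance (start : String) (goal : String) (limit : Int) (out : Int) : Decidable (Spec_sphinx_swap start goal limit out) := by unfold Spec_sphinx_swap; infer_instance

-- ===== CLAIM (what is proved, stated in full; the proofs are below) =====
def Claim_equal_sphinx_swap : Prop := ∀ (start : String) (goal : String) (limit : Int), Dom_sphinx_swap start goal limit → Spec_sphinx_swap start goal limit (sphinx_swap start goal limit)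

-- ===== LEMMAS AND PROOFS =====

-- Invariant: as long as diffs ≤ limit, B's loop equals diffs plus A's recursion at budget limit - diffs.
theorem sphinxSwapLoop_eq (s : List Char) : ∀ (g : List Char) (diffs limit : Int),
    diffs ≤ limit →
    sphinxSwapLoopB (s.zip g) diffs limit |(s.length : Int) - (g.length : Int)|
      = diffs + sphinxSwapRecA s g (limit - diffs) := by
  induction s with
  | nil =>
    intro g diffs limit h
    rw [sphinxSwapRecA, if_neg (by omega), if_pos (Or.inl rfl)]
    simp [sphinxSwapLoopB]
  | cons a s' ih =>
    intro g diffs limit h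
    cases g with
    | nil =>
      rw [sphinxSwapRecA, if_neg (by omega), if_pos (Or.inr rfl)]
      simp [sphinxSwapLoopB]
      positivity
    | cons b g' =>
      rw [sphinxSwapRecA, if_neg (by omega), if_neg (by simp)]
      simp only [List.zip_cons_cons, sphinxSwapLoopB, List.headI, List.tail]
      have hlen : |((a :: s').length : Int) - ((b :: g').length : Int)|
          = |(s'.length : Int) - (g'.length : Int)| := by
        simp only [List.length_cons]
        push_cast
        ring_nf
      by_cases hab : a = b
      · rw [if_neg (by simp [hab]), if_pos hab, hlen, ih g' diffs limit h]
      · rw [if_pos (by simp [hab]), if_neg hab]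
        by_cases hlim : diffs + 1 > limit
        · rw [if_pos hlim, sphinxSwapRecA, if_pos (by omega)]
          omega
        · rw [if_neg hlim, hlen, ih g' (diffs + 1) limit (by omega)]
          ring_nf

-- ===== VERDICT (by name: the statement is the Claim_ definition above) =====
theorem sphinx_swap_spec : Claim_equal_sphinx_swap := by
  intro start goal limit _
  unfold Spec_sphinx_swap sphinx_swap sphinx_swap_alt
  by_cases h : limit < 0
  · rw [if_pos h, sphinxSwapRecA, if_pos h]
  · rw [if_neg h, sphinxSwapLoop_eq _ _ 0 limit (by omega)]
    simp
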